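-- pv_equiv track=rewrite | github.com/si0005hp/coursera-Introduction_to_Discrete_Mathematics_for_Computer_Science | 2_Combinatorics_and_Probability/dice_game.py | count_wins
-- ===== SOURCE A (Python) =====
-- def count_wins(dice1, dice2):
--     assert len(dice1) == 6 and len(dice2) == 6
--     dice1_wins, dice2_wins = 0, 0
--
--     for i in dice1:
--         for j in dice2:
--             if i > j:
--                 dice1_wins += 1
--             elif i < j:
--                 dice2_wins += 1
--
--     return (dice1_wins, dice2_wins)
-- ===== SOURCE B (Python) =====
-- def count_wins(dice1, dice2):
--     assert len(dice1) == 6 and len(dice2) == 6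
--     s = sorted(dice2)
--     dice1_wins, dice2_wins = 0, 0
--     for i in dice1:
--         dice1_wins += _bisect_left(s, i)
--         dice2_wins += len(s) - _bisect_right(s, i)
--     return (dice1_wins, dice2_wins)
--
--
-- # verbatim textbook/CPython bisect_left (no imports, since A imports nothing)
-- def _bisect_left(s, x):
--     lo, hi = 0, len(s)
--     while lo < hi:
--         mid = (lo + hi) // 2
--         if s[mid] < x:
--             lo = mid + 1
--         else:
--             hi = mid
--     return lo
--
--
-- # verbatim textbook/CPython bisect_right
-- def _bisect_right(s, x):
--     lo, hi = 0, len(s)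
--     while lo < hi:
--         mid = (lo + hi) // 2
--         if x < s[mid]:
--             hi = mid
--         else:
--             lo = mid + 1
--     return lo
-- ===== Notes on version B (the rewrite author's own statement) =====
-- stated objective: alternative
-- what changed: Replaces the nested pairwise scan with one sort of dice2 followed by, for each value of dice1, two binary searches (bisect_left counts the strictly smaller dice2 values, len-bisect_right the strictly larger ones).
import Mathlib
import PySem

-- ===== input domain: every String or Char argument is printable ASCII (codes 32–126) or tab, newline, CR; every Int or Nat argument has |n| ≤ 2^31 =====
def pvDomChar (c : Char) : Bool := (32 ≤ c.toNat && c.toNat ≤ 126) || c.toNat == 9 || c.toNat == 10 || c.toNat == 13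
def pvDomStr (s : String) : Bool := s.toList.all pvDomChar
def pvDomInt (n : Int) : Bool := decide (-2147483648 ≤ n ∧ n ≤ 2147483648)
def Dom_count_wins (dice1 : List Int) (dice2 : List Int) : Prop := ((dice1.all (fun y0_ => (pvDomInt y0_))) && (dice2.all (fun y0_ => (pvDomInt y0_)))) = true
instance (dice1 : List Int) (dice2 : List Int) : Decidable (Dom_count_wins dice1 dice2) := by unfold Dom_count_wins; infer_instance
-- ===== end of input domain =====

-- B replaces A's nested pairwise scan with one sort of dice2 plus two binary searches per
-- value of dice1 (an alternative decomposition; at the fixed length 6 no speedup is claimed).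

-- ===== PORT A =====
def count_wins (dice1 : List Int) (dice2 : List Int) : Int × Int :=
  -- assert handled by Pre_count_wins
  dice1.foldl (fun w i =>
    dice2.foldl (fun w2 j =>
      if i > j then (w2.1 + 1, w2.2)
      else if i < j then (w2.1, w2.2 + 1)
      else w2) w) (0, 0)

-- ===== PORT B =====
-- Source B's hand-written _bisect_left/_bisect_right are verbatim CPython bisect_left/bisect_right;
-- per PYSEM.md they are ported as the PySem primitives PySem.List.bisectLeft/bisectRight.
def count_wins_alt (dice1 : List Int) (dice2 : List Int) : Int × Int :=
  let s := PySem.List.sorted dice2 (fun x => x)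
  dice1.foldl (fun w i =>
    (w.1 + (PySem.List.bisectLeft s i : Int),
     w.2 + ((s.length : Int) - (PySem.List.bisectRight s i : Int)))) (0, 0)

-- ===== PRECONDITION & SPEC =====
-- A's assert raises AssertionError unless both lists have length 6.
def Pre_count_wins (dice1 : List Int) (dice2 : List Int) : Prop :=
  dice1.length = 6 ∧ dice2.length = 6
instance (dice1 : List Int) (dice2 : List Int) : Decidable (Pre_count_wins dice1 dice2) := by
  unfold Pre_count_wins; infer_instance

def pvWitness_count_wins : List Int × List Int := ([1, 2, 3, 4, 5, 6], [2, 2, 2, 5, 5, 5])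

def Spec_count_wins (dice1 : List Int) (dice2 : List Int) (out : Int × Int) : Prop := out = count_wins_alt dice1 dice2
instance (dice1 : List Int) (dice2 : List Int) (out : Int × Int) : Decidable (Spec_count_wins dice1 dice2 out) := by unfold Spec_count_wins; infer_instance

-- ===== CLAIM (what is proved, stated in full; the proofs are below) =====
def Claim_equal_count_wins : Prop := ∀ (dice1 : List Int) (dice2 : List Int), Dom_count_wins dice1 dice2 → Pre_count_wins dice1 dice2 → Spec_count_wins dice1 dice2 (count_wins dice1 dice2)

-- ===== LEMMAS AND PROOFS =====

/-- If a boolean predicate holds exactly at the first `r` positions of a list, `countP` is `r`. -/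
theorem countP_eq_of_prefix (p : Int → Bool) :
    ∀ (s : List Int) (r : Nat), r ≤ s.length →
      (∀ (j : Nat) (hj : j < s.length), p s[j] = decide (j < r)) → s.countP p = r := by
  intro s
  induction s with
  | nil => intro r hr _; simpa using Nat.le_antisymm (by simpa using hr) (Nat.zero_le r) ▸ rfl
  | cons a t ih =>
    intro r hr h
    have h0 : p a = decide (0 < r) := h 0 (by simp)
    cases r with
    | zero =>
      have ht : t.countP p = 0 := by
        apply ih 0 (Nat.zero_le _)
        intro j hj
        have := h (j + 1) (by simpa using Nat.succ_lt_succ hj)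
        simpa using this
      simp [ht, h0]
    | succ r' =>
      have ht : t.countP p = r' := by
        apply ih r' (by simpa using Nat.succ_le_succ_iff.mp hr)
        intro j hj
        have := h (j + 1) (by simpa using Nat.succ_lt_succ hj)
        simpa [Nat.succ_lt_succ_iff] using this
      simp [ht, h0]

theorem bisectLeft_eq_countP (s : List Int) (x : Int)
    (hs : List.Pairwise (fun a b => a ≤ b) s) :
    PySem.List.bisectLeft s x = s.countP (fun j => decide (j < x)) := by
  obtain ⟨hle, hlt, hge⟩ := PySem.List.bisectLeft_spec s x hs
  refine (countP_eq_of_prefix _ s _ hle ?_).symm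
  intro j hj
  by_cases hjr : j < PySem.List.bisectLeft s x
  · simp [hjr, hlt j hj hjr]
  · have := hge j hj (Nat.le_of_not_lt hjr)
    simp [hjr, not_lt.mpr this]

theorem bisectRight_eq_countP (s : List Int) (x : Int)
    (hs : List.Pairwise (fun a b => a ≤ b) s) :
    PySem.List.bisectRight s x = s.countP (fun j => decide (j ≤ x)) := by
  obtain ⟨hle, hlt, hge⟩ := PySem.List.bisectRight_spec s x hs
  refine (countP_eq_of_prefix _ s _ hle ?_).symm
  intro j hj
  by_cases hjr : j < PySem.List.bisectRight s x
  · simp [hjr, hlt j hj hjr]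
  · have := hge j hj (Nat.le_of_not_lt hjr)
    simp [hjr, not_le.mpr this]

/-- A's inner loop over `dice2` adds the two pairwise counts to the accumulator. -/
theorem innerA_eq (i : Int) :
    ∀ (l : List Int) (w : Int × Int),
      l.foldl (fun w2 j =>
          if i > j then (w2.1 + 1, w2.2)
          else if i < j then (w2.1, w2.2 + 1)
          else w2) w
        = (w.1 + (l.countP (fun j => decide (j < i)) : Int),
           w.2 + (l.countP (fun j => decide (i < j)) : Int)) := by
  intro l
  induction l with
  | nil => intro w; simp
  | cons a t ih =>
    intro w
    by_cases h1 : i > a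
    · have h2 : ¬ i < a := by omega
      have ha : (decide (a < i)) = true := by simpa using h1
      have hb : (decide (i < a)) = false := by simpa using h2
      simp [List.foldl_cons, h1, ih, hb]
      ring
    · by_cases h2 : i < a
      · have ha : (decide (a < i)) = false := by simpa using h1
        have hb : (decide (i < a)) = true := by simpa using h2
        simp [List.foldl_cons, h1, h2, ih]
        ring
      · have ha : (decide (a < i)) = false := by simpa using h1
        have hb : (decide (i < a)) = false := by simpa using h2
        simp [List.foldl_cons, h1, h2, ih]

/-- B's per-element step computes the same two increments as A's inner loop. -/
theorem step_eq (dice2 : List Int) (i : Int) (w : Int × Int) :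
    (w.1 + (PySem.List.bisectLeft (PySem.List.sorted dice2 (fun x => x)) i : Int),
     w.2 + (((PySem.List.sorted dice2 (fun x => x)).length : Int)
             - (PySem.List.bisectRight (PySem.List.sorted dice2 (fun x => x)) i : Int)))
      = (w.1 + (dice2.countP (fun j => decide (j < i)) : Int),
         w.2 + (dice2.countP (fun j => decide (i < j)) : Int)) := by
  set s := PySem.List.sorted dice2 (fun x => x) with hsdef
  have hpair : List.Pairwise (fun a b => a ≤ b) s := PySem.List.sorted_pairwise dice2 (fun x => x)
  have hperm : s.Perm dice2 := PySem.List.sorted_perm dice2 (fun x => x) false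
  have hL : PySem.List.bisectLeft s i = dice2.countP (fun j => decide (j < i)) := by
    rw [bisectLeft_eq_countP s i hpair, hperm.countP_eq]
  have hR : PySem.List.bisectRight s i = dice2.countP (fun j => decide (j ≤ i)) := by
    rw [bisectRight_eq_countP s i hpair, hperm.countP_eq]
  have hlen : s.length = dice2.countP (fun j => decide (j ≤ i)) + dice2.countP (fun j => decide (i < j)) := by
    have := List.length_eq_countP_add_countP (l := dice2) (p := fun j => decide (j ≤ i))
    rw [hperm.length_eq, this]
    congr 1
    apply List.countP_congr
    intro a _
    simp [not_le]
  rw [hL, hR, hlen]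
  push_cast
  congr 1
  ring

/-- Both outer folds agree from any common accumulator. -/
theorem fold_eq (dice2 : List Int) :
    ∀ (l : List Int) (w : Int × Int),
      l.foldl (fun w i =>
          dice2.foldl (fun w2 j =>
            if i > j then (w2.1 + 1, w2.2)
            else if i < j then (w2.1, w2.2 + 1)
            else w2) w) w
        = l.foldl (fun w i =>
            (w.1 + (PySem.List.bisectLeft (PySem.List.sorted dice2 (fun x => x)) i : Int),
             w.2 + (((PySem.List.sorted dice2 (fun x => x)).length : Int)
                     - (PySem.List.bisectRight (PySem.List.sorted dice2 (fun x => x)) i : Int)))) w := by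
  intro l
  induction l with
  | nil => intro w; rfl
  | cons a t ih =>
    intro w
    simp only [List.foldl_cons]
    rw [innerA_eq, step_eq, ih]

-- ===== VERDICT (by name: the statement is the Claim_ definition above) =====
theorem count_wins_spec : Claim_equal_count_wins := by
  intro dice1 dice2 _ _
  unfold Spec_count_wins count_wins count_wins_alt
  exact fold_eq dice2 dice1 (0, 0)
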